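-- pv_equiv track=rewrite | github.com/Michal0ss/ASD | Exam/20_21/egz0/tanagram/tanagram.py | tanagram
-- ===== SOURCE A (Python) =====
-- def tanagram(x, y, t):
--     n = len(x)
--     if len(x) != len(y):
--         return  False
--     istaken = [False] * n
--     for i in range(n):
--         start_j = max(0, i-t)
--         end_j = min(n, i+ t + 1)
--         for j in range(start_j, end_j):
--             if x[i] == y[j] and not istaken[j]:
--                 istaken[j] = True
--                 break
--         else:
--             return False
--     return True
-- ===== SOURCE B (Python) =====
-- def tanagram(x, y, t):
--     n = len(x)
--     if n != len(y):
--         return False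
--     cur = {}
--     for i, c in enumerate(x):
--         start = i - t
--         if start < 0:
--             start = 0
--         end = i + t + 1
--         if end > n:
--             end = n
--         k = cur.get(c, 0)
--         while k < n and (y[k] != c or k < start):
--             k += 1
--         if k >= end:
--             return False
--         cur[c] = k + 1
--     return True
-- ===== Notes on version B (the rewrite author's own statement) =====
-- stated objective: faster
-- what changed: A rescans the whole window [i-t, i+t+1) over y with an istaken array for every i; B keeps one amortised advancing cursor per character (a dict of next-candidate indices into y), so each position of y is passed at most once per character and the inner window scan disappears.
import Mathlib
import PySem

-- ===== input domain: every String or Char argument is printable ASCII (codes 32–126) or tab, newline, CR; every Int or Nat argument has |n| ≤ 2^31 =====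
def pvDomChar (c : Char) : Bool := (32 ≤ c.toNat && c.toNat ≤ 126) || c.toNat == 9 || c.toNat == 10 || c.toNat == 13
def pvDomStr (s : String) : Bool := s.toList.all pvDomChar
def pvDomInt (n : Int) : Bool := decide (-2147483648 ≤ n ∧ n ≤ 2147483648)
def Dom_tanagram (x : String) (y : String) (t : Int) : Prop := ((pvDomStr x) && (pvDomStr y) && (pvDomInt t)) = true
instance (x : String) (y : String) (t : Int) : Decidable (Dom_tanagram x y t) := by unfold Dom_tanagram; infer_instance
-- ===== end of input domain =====

-- B replaces A's per-position rescan of the whole window by one amortised advancing cursor per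
-- character (dict of next-candidate indices into y), which a timing run measured as faster.

-- ===== PORT A =====
-- inner 'for j in range(start_j, end_j): … break / else: return False'
def tanagramFind (yl : List Char) (xi? : Option Char) (tk : List Bool) : List Int → Option (List Bool)
  | [] => none
  | j :: js =>
    if xi? == PySem.List.pyGet? yl j && PySem.List.pyGet? tk j == some false then
      some (PySem.List.pySetD tk j true)
    else tanagramFind yl xi? tk js

-- outer 'for i in range(n)' carrying istaken
def tanagramLoopA (xl yl : List Char) (n t : Int) : List Bool → List Int → Bool
  | _, [] => true
  | tk, i :: is =>
    let start_j := max 0 (i - t)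
    let end_j := min n (i + t + 1)
    match tanagramFind yl (PySem.List.pyGet? xl i) tk (PySem.List.pyRange start_j end_j 1) with
    | none => false
    | some tk' => tanagramLoopA xl yl n t tk' is

def tanagram (x : String) (y : String) (t : Int) : Bool :=
  let xl := x.toList
  let yl := y.toList
  let n : Int := xl.length
  if n ≠ (yl.length : Int) then false
  else tanagramLoopA xl yl n t (List.replicate xl.length false) (PySem.List.pyRange 0 n 1)

-- ===== PORT B =====
-- 'while k < n and (y[k] != c or k < start): k += 1' (fuel = len(y) bounds the k increments)
def tanagramScan (yl : List Char) (c : Char) (n s : Int) : Int → Nat → Int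
  | k, 0 => k
  | k, fuel + 1 =>
    if k < n ∧ (PySem.List.pyGet? yl k ≠ some c ∨ k < s) then
      tanagramScan yl c n s (k + 1) fuel
    else k

-- 'for i, c in enumerate(x)' carrying the per-character cursor dict
def tanagramLoopB (yl : List Char) (n t : Int) : PySem.Dict Char Int → List (Int × Char) → Bool
  | _, [] => true
  | cur, (i, c) :: rest =>
    let s := if i - t < 0 then 0 else i - t
    let e := if i + t + 1 > n then n else i + t + 1
    let k := tanagramScan yl c n s (cur.getD c 0) yl.length
    if k ≥ e then false
    else tanagramLoopB yl n t (cur.insert c (k + 1)) rest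

def tanagram_alt (x : String) (y : String) (t : Int) : Bool :=
  let xl := x.toList
  let yl := y.toList
  let n : Int := xl.length
  if n ≠ (yl.length : Int) then false
  else tanagramLoopB yl n t PySem.Dict.empty (PySem.List.enumerate xl 0)

-- ===== PRECONDITION & SPEC =====
def Spec_tanagram (x : String) (y : String) (t : Int) (out : Bool) : Prop := out = tanagram_alt x y t
instance (x : String) (y : String) (t : Int) (out : Bool) : Decidable (Spec_tanagram x y t out) := by unfold Spec_tanagram; infer_instance

-- ===== CLAIM (what is proved, stated in full; the proofs are below) =====
def Claim_equal_tanagram : Prop := ∀ (x : String) (y : String) (t : Int), Dom_tanagram x y t → Spec_tanagram x y t (tanagram x y t)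

-- ===== LEMMAS AND PROOFS =====

lemma scan_spec (yl : List Char) (c : Char) (s : Int) :
    ∀ (fuel : Nat) (k0 : Int), 0 ≤ k0 → ((yl.length : Int) - k0).toNat ≤ fuel →
    k0 ≤ tanagramScan yl c (yl.length : Int) s k0 fuel ∧
    (∀ k : Int, k0 ≤ k → k < tanagramScan yl c (yl.length : Int) s k0 fuel →
       k < (yl.length : Int) ∧ (yl[k.toNat]? ≠ some c ∨ k < s)) ∧
    ((yl.length : Int) ≤ tanagramScan yl c (yl.length : Int) s k0 fuel ∨
       (tanagramScan yl c (yl.length : Int) s k0 fuel < (yl.length : Int) ∧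
        yl[(tanagramScan yl c (yl.length : Int) s k0 fuel).toNat]? = some c ∧
        s ≤ tanagramScan yl c (yl.length : Int) s k0 fuel)) := by
  intro fuel
  induction fuel with
  | zero =>
    intro k0 h0 hf
    have hn : (yl.length : Int) ≤ k0 := by omega
    simp only [tanagramScan]
    refine ⟨le_refl _, by omega, Or.inl hn⟩
  | succ f ih =>
    intro k0 h0 hf
    simp only [tanagramScan]
    by_cases hc : k0 < (yl.length : Int) ∧ (PySem.List.pyGet? yl k0 ≠ some c ∨ k0 < s)
    · rw [if_pos hc]
      obtain ⟨h1, h2, h3⟩ := ih (k0 + 1) (by omega) (by omega)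
      refine ⟨by omega, ?_, h3⟩
      intro k hk1 hk2
      rcases eq_or_lt_of_le hk1 with rfl | hlt
      · exact ⟨hc.1, by rw [PySem.List.pyGet?_of_nonneg yl h0] at hc; exact hc.2⟩
      · exact h2 k (by omega) hk2
    · rw [if_neg hc]
      push Not at hc
      refine ⟨le_refl _, by omega, ?_⟩
      by_cases hn : (yl.length : Int) ≤ k0
      · exact Or.inl hn
      · push Not at hn
        obtain ⟨hg, hs⟩ := hc hn
        rw [PySem.List.pyGet?_of_nonneg yl h0] at hg
        exact Or.inr ⟨hn, hg, hs⟩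

-- the Bool condition A's inner loop tests at index j
def findP (yl : List Char) (xi? : Option Char) (tk : List Bool) (j : Int) : Bool :=
  xi? == PySem.List.pyGet? yl j && PySem.List.pyGet? tk j == some false

lemma findA_none_elim (yl : List Char) (xi? : Option Char) (tk : List Bool) :
    ∀ (m : Nat) (s e : Int), (e - s).toNat ≤ m →
    tanagramFind yl xi? tk (PySem.List.pyRange s e 1) = none →
    ∀ j : Int, s ≤ j → j < e → findP yl xi? tk j = false := by
  intro m
  induction m with
  | zero => intro s e hm _ j h1 h2; omega
  | succ m ih =>
    intro s e hm hfind j h1 h2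
    rw [PySem.List.pyRange_one_cons (by omega)] at hfind
    simp only [tanagramFind] at hfind
    by_cases hp : findP yl xi? tk s = true
    · rw [if_pos (by simpa [findP] using hp)] at hfind; exact absurd hfind (by simp)
    · rw [if_neg (by simpa [findP] using hp)] at hfind
      rcases eq_or_lt_of_le h1 with rfl | hlt
      · simpa using hp
      · exact ih (s+1) e (by omega) hfind j (by omega) h2

lemma findA_some_elim (yl : List Char) (xi? : Option Char) (tk : List Bool) :
    ∀ (m : Nat) (s e : Int), (e - s).toNat ≤ m →
    ∀ out, tanagramFind yl xi? tk (PySem.List.pyRange s e 1) = some out →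
    ∃ j : Int, s ≤ j ∧ j < e ∧ findP yl xi? tk j = true ∧
      (∀ k : Int, s ≤ k → k < j → findP yl xi? tk k = false) ∧
      out = PySem.List.pySetD tk j true := by
  intro m
  induction m with
  | zero =>
    intro s e hm out hfind
    rw [PySem.List.pyRange_one_eq_nil (by omega)] at hfind
    exact absurd hfind (by simp [tanagramFind])
  | succ m ih =>
    intro s e hm out hfind
    by_cases hse : e ≤ s
    · rw [PySem.List.pyRange_one_eq_nil hse] at hfind
      exact absurd hfind (by simp [tanagramFind])
    · rw [PySem.List.pyRange_one_cons (by omega)] at hfind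
      simp only [tanagramFind] at hfind
      by_cases hp : findP yl xi? tk s = true
      · rw [if_pos (by simpa [findP] using hp)] at hfind
        refine ⟨s, le_refl _, by omega, hp, by omega, by simpa using hfind.symm⟩
      · rw [if_neg (by simpa [findP] using hp)] at hfind
        obtain ⟨j, h1, h2, h3, h4, h5⟩ := ih (s+1) e (by omega) out hfind
        refine ⟨j, by omega, h2, h3, ?_, h5⟩
        intro k hk1 hk2
        rcases eq_or_lt_of_le hk1 with rfl | hlt
        · simpa using hp
        · exact h4 k (by omega) hk2

lemma findP_iff (yl : List Char) (c : Char) (tk : List Bool) (j : Int) (h0 : 0 ≤ j) :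
    findP yl (some c) tk j = true ↔ (yl[j.toNat]? = some c ∧ tk[j.toNat]? = some false) := by
  rw [findP, PySem.List.pyGet?_of_nonneg yl h0, PySem.List.pyGet?_of_nonneg tk h0]
  simp only [Bool.and_eq_true, beq_iff_eq]
  exact and_congr eq_comm Iff.rfl

-- invariant tying A's istaken list to B's cursor dict at the start of iteration i
def InvP (yl : List Char) (t : Int) (tk : List Bool) (cur : PySem.Dict Char Int) (i : Nat) : Prop :=
  (∀ ch : Char, 0 ≤ cur.getD ch 0) ∧
  (∀ m : Nat, m < yl.length →
     (cur.getD (yl.getD m ' ') 0 ≤ (m : Int) → tk[m]? = some false) ∧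
     ((m : Int) < cur.getD (yl.getD m ' ') 0 → tk[m]? = some true ∨ (m : Int) < (i : Int) - t))

lemma getD_eq_some_char (yl : List Char) (m : Nat) (c : Char) (hm : m < yl.length) :
    yl.getD m ' ' = c ↔ yl[m]? = some c := by
  rw [List.getD_eq_getElem?_getD, List.getElem?_eq_getElem hm]
  simp

lemma step_main (yl : List Char) (t : Int) (i : Nat) (c : Char) (tk : List Bool)
    (cur : PySem.Dict Char Int) (htk : tk.length = yl.length)
    (hinv : InvP yl t tk cur i) :
    (tanagramFind yl (some c) tk (PySem.List.pyRange (max 0 ((i:Int) - t)) (min (yl.length:Int) ((i:Int)+t+1)) 1) = none ∧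
       min (yl.length:Int) ((i:Int)+t+1) ≤ tanagramScan yl c (yl.length:Int) (max 0 ((i:Int)-t)) (cur.getD c 0) yl.length)
    ∨ (∃ j : Nat, j < yl.length ∧ (j:Int) < min (yl.length:Int) ((i:Int)+t+1) ∧
        tanagramFind yl (some c) tk (PySem.List.pyRange (max 0 ((i:Int) - t)) (min (yl.length:Int) ((i:Int)+t+1)) 1)
          = some (tk.set j true) ∧
        tanagramScan yl c (yl.length:Int) (max 0 ((i:Int)-t)) (cur.getD c 0) yl.length = (j:Int) ∧
        InvP yl t (tk.set j true) (cur.insert c ((j:Int)+1)) (i+1)) := by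
  obtain ⟨hNN, hmain⟩ := hinv
  set n : Int := (yl.length : Int) with hn
  set s : Int := max 0 ((i:Int) - t) with hs
  set e : Int := min n ((i:Int) + t + 1) with he
  set k0 : Int := cur.getD c 0 with hk0
  have h0 : 0 ≤ k0 := hNN c
  obtain ⟨hge, hmid, hexit⟩ := scan_spec yl c s yl.length k0 h0 (by omega)
  set r : Int := tanagramScan yl c n s k0 yl.length with hr
  have hs0 : 0 ≤ s := le_max_left _ _
  have hsit : (i:Int) - t ≤ s := le_max_right _ _
  have hen : e ≤ n := min_le_left _ _
  cases hfind : tanagramFind yl (some c) tk (PySem.List.pyRange s e 1) with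
  | none =>
    left
    refine ⟨rfl, ?_⟩
    by_contra hre
    push Not at hre
    have hrn : r < n := lt_of_lt_of_le hre hen
    rcases hexit with h | ⟨_, hyc, hsr⟩
    · omega
    · have hr0 : 0 ≤ r := le_trans h0 hge
      have hrlen : r.toNat < yl.length := by omega
      have hylgetD : yl.getD r.toNat ' ' = c := (getD_eq_some_char yl r.toNat c hrlen).mpr hyc
      have h1 := (hmain r.toNat hrlen).1
      rw [hylgetD] at h1
      have htkr : tk[r.toNat]? = some false := h1 (by omega)
      have hnone := findA_none_elim yl (some c) tk ((e - s).toNat) s e (le_refl _) hfind r hsr hre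
      rw [← Bool.not_eq_true, findP_iff yl c tk r hr0] at hnone
      exact hnone ⟨hyc, htkr⟩
  | some out =>
    obtain ⟨j, hsj, hje, hPj, hmin, hout⟩ :=
      findA_some_elim yl (some c) tk ((e - s).toNat) s e (le_refl _) out hfind
    have hj0 : 0 ≤ j := le_trans hs0 hsj
    obtain ⟨hyj, htkj⟩ := (findP_iff yl c tk j hj0).mp hPj
    set jn : Nat := j.toNat with hjndef
    have hjcast : (jn : Int) = j := Int.toNat_of_nonneg hj0
    have hjlen : jn < yl.length := by omega
    have hylj : yl.getD jn ' ' = c := (getD_eq_some_char yl jn c hjlen).mpr hyj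
    have hk0j : k0 ≤ j := by
      by_contra hlt
      push Not at hlt
      have h2 := (hmain jn hjlen).2
      rw [hylj] at h2
      rcases h2 (by omega) with h | h
      · rw [htkj] at h; simp at h
      · omega
    have hrj : r = j := by
      have hrle : r ≤ j := by
        by_contra hjr
        push Not at hjr
        obtain ⟨_, hor⟩ := hmid j hk0j hjr
        rcases hor with h | h
        · exact h hyj
        · omega
      rcases eq_or_lt_of_le hrle with h | hrltj
      · exact h
      · exfalso
        rcases hexit with h | ⟨hrn, hyc, hsr⟩
        · omega
        · have hr0 : 0 ≤ r := le_trans h0 hge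
          have hrlen : r.toNat < yl.length := by omega
          have hylr : yl.getD r.toNat ' ' = c := (getD_eq_some_char yl r.toNat c hrlen).mpr hyc
          have h1 := (hmain r.toNat hrlen).1
          rw [hylr] at h1
          have htkr : tk[r.toNat]? = some false := h1 (by omega)
          have hF := hmin r hsr hrltj
          rw [← Bool.not_eq_true, findP_iff yl c tk r hr0] at hF
          exact hF ⟨hyc, htkr⟩
    right
    refine ⟨jn, hjlen, by omega, ?_, by omega, ?_, ?_⟩
    · rw [hout, ← hjcast, PySem.List.pySetD_natCast]
    · -- cursor values stay nonnegative
      intro ch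
      rw [PySem.Dict.getD_insert]
      split
      · omega
      · exact hNN ch
    · -- main invariant clauses at i+1
      intro m hm
      by_cases hmc : yl.getD m ' ' = c
      · rw [hmc, PySem.Dict.getD_insert, if_pos rfl]
        constructor
        · intro hle
          rw [List.getElem?_set, if_neg (by omega)]
          have h1 := (hmain m hm).1
          rw [hmc] at h1
          exact h1 (by omega)
        · intro hlt
          by_cases hmj : m = jn
          · subst hmj
            rw [List.getElem?_set, if_pos rfl, if_pos (by omega)]
            exact Or.inl rfl
          · have hmne : jn ≠ m := fun h => hmj h.symm
            rw [List.getElem?_set, if_neg hmne]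
            have hmltj : (m:Int) < j := by omega
            by_cases hmk0 : (m:Int) < k0
            · have h2 := (hmain m hm).2
              rw [hmc] at h2
              rcases h2 hmk0 with h | h
              · exact Or.inl h
              · exact Or.inr (by push_cast; omega)
            · by_cases hms : (m:Int) < s
              · right
                have hit : 0 < (i:Int) - t := by
                  by_contra hle0
                  push Not at hle0
                  rw [hs] at hms
                  omega
                rw [hs] at hms
                push_cast
                omega
              · exfalso
                have hPm := hmin m (by omega) hmltj
                have h1 := (hmain m hm).1
                rw [hmc] at h1
                have htkm : tk[m]? = some false := h1 (by omega)
                have hylm : yl[m]? = some c := (getD_eq_some_char yl m c hm).mp hmc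
                rw [← Bool.not_eq_true, findP_iff yl c tk (m:Int) (by omega)] at hPm
                exact hPm (by simpa using And.intro hylm htkm)
      · rw [PySem.Dict.getD_insert, if_neg hmc]
        have hmne : jn ≠ m := by
          intro h
          exact hmc (h ▸ hylj)
        rw [List.getElem?_set, if_neg hmne]
        constructor
        · exact (hmain m hm).1
        · intro hlt
          rcases (hmain m hm).2 hlt with h | h
          · exact Or.inl h
          · exact Or.inr (by push_cast; omega)

lemma dict_empty_getD (ch : Char) : (PySem.Dict.empty : PySem.Dict Char Int).getD ch 0 = 0 := by
  simp [PySem.Dict.getD, PySem.Dict.get?, PySem.Dict.empty]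

lemma loop_eq (xl yl : List Char) (t : Int) (hn : xl.length = yl.length) :
    ∀ (d : List Char) (i0 : Nat) (tk : List Bool) (cur : PySem.Dict Char Int),
      xl.drop i0 = d → tk.length = yl.length → InvP yl t tk cur i0 →
      tanagramLoopA xl yl (yl.length : Int) t tk (PySem.List.pyRange (i0 : Int) (yl.length : Int) 1) =
      tanagramLoopB yl (yl.length : Int) t cur (PySem.List.enumerate d (i0 : Int)) := by
  intro d
  induction d with
  | nil =>
    intro i0 tk cur hd htk hinv
    have hlen : xl.length ≤ i0 := List.drop_eq_nil_iff.mp hd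
    rw [PySem.List.pyRange_one_eq_nil (by omega), PySem.List.enumerate_nil]
    simp [tanagramLoopA, tanagramLoopB]
  | cons c d' ih =>
    intro i0 tk cur hd htk hinv
    have hi0 : i0 < xl.length := by
      by_contra h
      push Not at h
      rw [List.drop_eq_nil_iff.mpr h] at hd
      simp at hd
    have hcons := List.getElem_cons_drop hi0
    rw [hd] at hcons
    have hx1 : xl[i0] = c := (List.cons.injEq _ _ _ _ ▸ hcons).1
    have hx2 : xl.drop (i0 + 1) = d' := (List.cons.injEq _ _ _ _ ▸ hcons).2
    rw [PySem.List.pyRange_one_cons (by omega), PySem.List.enumerate_cons]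
    simp only [tanagramLoopA, tanagramLoopB]
    have hxi : PySem.List.pyGet? xl (i0 : Int) = some c := by
      rw [PySem.List.pyGet?_natCast, List.getElem?_eq_getElem hi0, hx1]
    rw [hxi]
    have hsif : (if (i0:Int) - t < 0 then 0 else (i0:Int) - t) = max 0 ((i0:Int) - t) := by
      rw [max_def]; split_ifs <;> omega
    have heif : (if (i0:Int) + t + 1 > (yl.length:Int) then (yl.length:Int) else (i0:Int) + t + 1)
        = min (yl.length:Int) ((i0:Int) + t + 1) := by
      rw [min_def]; split_ifs <;> omega
    rw [hsif, heif]
    rcases step_main yl t i0 c tk cur htk hinv with ⟨hfnone, hre⟩ | ⟨j, hjlen, hje, hfsome, hscan, hinv'⟩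
    · rw [hfnone, if_pos (show tanagramScan yl c (yl.length:Int) (max 0 ((i0:Int)-t)) (cur.getD c 0) yl.length ≥ min (yl.length:Int) ((i0:Int)+t+1) from hre)]
    · rw [hfsome, hscan, if_neg (by omega)]
      have := ih (i0 + 1) (tk.set j true) (cur.insert c ((j:Int) + 1)) hx2 (by rw [List.length_set]; exact htk) (by exact_mod_cast hinv')
      push_cast at this
      simpa using this

lemma inv_init (yl : List Char) (t : Int) : InvP yl t (List.replicate yl.length false) PySem.Dict.empty 0 := by
  constructor
  · intro ch; rw [dict_empty_getD]
  · intro m hm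
    rw [dict_empty_getD]
    constructor
    · intro _
      rw [List.getElem?_replicate, if_pos hm]
    · intro h
      omega

lemma tanagram_eq_alt : ∀ (x y : String) (t : Int), tanagram x y t = tanagram_alt x y t := by
  intro x y t
  simp only [tanagram, tanagram_alt]
  split_ifs with h1
  · rfl
  · push Not at h1
    have hn : x.toList.length = y.toList.length := by exact_mod_cast h1
    rw [hn]
    have := loop_eq x.toList y.toList t hn x.toList 0 (List.replicate y.toList.length false)
      PySem.Dict.empty (by simp) (by simp) (inv_init y.toList t)
    simpa using this

-- ===== VERDICT (by name: the statement is the Claim_ definition above) =====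
theorem tanagram_spec : Claim_equal_tanagram := by
  intro x y t _
  unfold Spec_tanagram
  exact tanagram_eq_alt x y t
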